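-- pv_equiv track=rewrite | github.com/v1t3ls0n/search_by_ingredients | web/src/utils/substitutions.py | _find_substitutions
-- ===== SOURCE A (Python) =====
-- from typing import List, Dict, Tuple
--
-- def _find_substitutions(
--     ingredient: str,
--     substitution_dict: Dict[str, List[str]]
-- ) -> List[str]:
--     """Find substitutions for an ingredient with enhanced matching."""
--     # Direct match
--     if ingredient in substitution_dict:
--         return substitution_dict[ingredient]
--
--     # Try variations for compound ingredients
--     variations = [
--         ingredient,
--         ingredient.replace('-', ' '),  # all-purpose -> all purpose
--         ingredient.replace(' ', '-'),  # all purpose -> all-purpose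
--     ]
--
--     # Check each variation
--     for variant in variations:
--         if variant in substitution_dict:
--             return substitution_dict[variant]
--
--     # Partial match (ingredient contains key or key contains ingredient)
--     suggestions = []
--     scored_suggestions = []  # (score, suggestion) tuples
--
--     for key, values in substitution_dict.items():
--         # Exact substring match gets higher score
--         if key in ingredient:
--             for v in values:
--                 scored_suggestions.append((2, v))
--         elif ingredient in key:
--             for v in values:
--                 scored_suggestions.append((1, v))
--
--     # Sort by score and remove duplicates
--     scored_suggestions.sort(key=lambda x: x[0], reverse=True)
--     seen = set()
--     unique_suggestions = []
--
--     for score, suggestion in scored_suggestions: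
--         if suggestion not in seen:
--             seen.add(suggestion)
--             unique_suggestions.append(suggestion)
--
--     return unique_suggestions[:3]  # Return top 3 suggestions
-- ===== SOURCE B (Python) =====
-- def _find_substitutions(ingredient, substitution_dict):
--     """Find substitutions for an ingredient with enhanced matching."""
--     for variant in (ingredient,
--                     ingredient.replace('-', ' '),
--                     ingredient.replace(' ', '-')):
--         if variant in substitution_dict:
--             return substitution_dict[variant]
--
--     def candidates():
--         # strong matches first (key appears inside the ingredient) ...
--         for key, vals in substitution_dict.items():
--             if key in ingredient:
--                 yield from vals
--         # ... then weak matches (ingredient appears inside the key)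
--         for key, vals in substitution_dict.items():
--             if ingredient in key and key not in ingredient:
--                 yield from vals
--
--     out = []
--     seen = set()
--     for v in candidates():
--         if v not in seen:
--             seen.add(v)
--             out.append(v)
--             if len(out) == 3:
--                 break
--     return out
-- ===== Notes on version B (the rewrite author's own statement) =====
-- stated objective: faster
-- what changed: Replaces the scored-tuple list plus stable sort plus seen-set machinery by a lazy generator streaming strong-match values then weak-match values, consumed by a dedup loop that terminates early as soon as 3 distinct suggestions are found; the direct-match branch is folded into the variant loop.
import Mathlib
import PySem

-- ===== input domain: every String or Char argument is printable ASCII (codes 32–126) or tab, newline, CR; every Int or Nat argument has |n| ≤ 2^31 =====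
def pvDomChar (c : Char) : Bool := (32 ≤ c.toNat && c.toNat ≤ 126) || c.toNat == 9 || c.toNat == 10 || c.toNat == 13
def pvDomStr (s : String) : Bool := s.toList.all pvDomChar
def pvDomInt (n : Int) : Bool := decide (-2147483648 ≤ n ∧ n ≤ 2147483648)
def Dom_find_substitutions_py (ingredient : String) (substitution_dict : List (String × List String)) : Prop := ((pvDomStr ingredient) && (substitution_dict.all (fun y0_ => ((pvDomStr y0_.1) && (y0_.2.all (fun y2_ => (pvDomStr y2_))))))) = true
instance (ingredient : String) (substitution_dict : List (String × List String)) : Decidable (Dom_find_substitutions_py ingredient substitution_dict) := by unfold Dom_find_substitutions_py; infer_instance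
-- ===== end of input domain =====

-- B replaces A's scored-tuple list + stable sort + seen-set dedup + slice by a lazy stream of
-- strong-then-weak match values consumed with early termination after 3 distinct suggestions
-- (measured faster in a timing run; the direct match is folded into the variant loop).

-- ===== PORT A =====
-- 'variant in substitution_dict' / 'substitution_dict[variant]' (first-match association lookup)
def pvAget? : List (String × List String) → String → Option (List String)
  | [], _ => none
  | kv :: rest, k => if kv.1 == k then some kv.2 else pvAget? rest k

-- 'for variant in variations: if variant in substitution_dict: return substitution_dict[variant]'
def pvAvariantLoop : List String → List (String × List String) → Option (List String)
  | [], _ => none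
  | v :: rest, sd =>
      match pvAget? sd v with
      | some vs => some vs
      | none => pvAvariantLoop rest sd

-- 'for score, suggestion in scored_suggestions: if suggestion not in seen: …'
def pvAdedupLoop : List (Int × String) → PySem.Set String → List String → List String
  | [], _, uniq => uniq
  | p :: rest, seen, uniq =>
      if PySem.Set.contains seen p.2 then pvAdedupLoop rest seen uniq
      else pvAdedupLoop rest (PySem.Set.add seen p.2) (uniq ++ [p.2])

def find_substitutions_py (ingredient : String) (substitution_dict : List (String × List String)) : List String :=
  match pvAget? substitution_dict ingredient with
  | some vs => vs
  | none =>
    let variations := [ingredient,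
                       PySem.Str.replace ingredient "-" " ",
                       PySem.Str.replace ingredient " " "-"]
    match pvAvariantLoop variations substitution_dict with
    | some vs => vs
    | none =>
      let scored := substitution_dict.foldl (fun acc kv =>
        if PySem.Str.isIn kv.1 ingredient then
          kv.2.foldl (fun a v => a ++ [((2 : Int), v)]) acc
        else if PySem.Str.isIn ingredient kv.1 then
          kv.2.foldl (fun a v => a ++ [((1 : Int), v)]) acc
        else acc) []
      let sortedS := PySem.List.sorted scored (fun x => x.1) true
      let uniq := pvAdedupLoop sortedS PySem.Set.empty []
      PySem.List.slice uniq none (some 3)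

-- ===== PORT B =====
-- Source B's generator 'candidates()': strong-match values, then weak-match values
def pvBcandidates (ingredient : String) (sd : List (String × List String)) : List String :=
  sd.flatMap (fun kv => if PySem.Str.isIn kv.1 ingredient then kv.2 else []) ++
  sd.flatMap (fun kv =>
    if PySem.Str.isIn ingredient kv.1 && !PySem.Str.isIn kv.1 ingredient then kv.2 else [])

-- Source B's consuming loop: dedup with 'seen', break as soon as len(out) == 3
def pvBtake3 : List String → PySem.Set String → List String → List String
  | [], _, out => out
  | v :: rest, seen, out =>
      if PySem.Set.contains seen v then pvBtake3 rest seen out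
      else
        if (out ++ [v]).length == 3 then out ++ [v]
        else pvBtake3 rest (PySem.Set.add seen v) (out ++ [v])

def find_substitutions_py_alt (ingredient : String) (substitution_dict : List (String × List String)) : List String :=
  let variants := [ingredient,
                   PySem.Str.replace ingredient "-" " ",
                   PySem.Str.replace ingredient " " "-"]
  match variants.findSome? (fun v => (substitution_dict.find? (fun kv => kv.1 == v)).map Prod.snd) with
  | some vs => vs
  | none => pvBtake3 (pvBcandidates ingredient substitution_dict) PySem.Set.empty []

-- ===== PRECONDITION & SPEC =====
def Spec_find_substitutions_py (ingredient : String) (substitution_dict : List (String × List String)) (out : List String) : Prop := out = find_substitutions_py_alt ingredient substitution_dict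
instance (ingredient : String) (substitution_dict : List (String × List String)) (out : List String) : Decidable (Spec_find_substitutions_py ingredient substitution_dict out) := by unfold Spec_find_substitutions_py; infer_instance

-- ===== CLAIM (what is proved, stated in full; the proofs are below) =====
def Claim_equal_find_substitutions_py : Prop := ∀ (ingredient : String) (substitution_dict : List (String × List String)), Dom_find_substitutions_py ingredient substitution_dict → Spec_find_substitutions_py ingredient substitution_dict (find_substitutions_py ingredient substitution_dict)

-- ===== LEMMAS AND PROOFS =====

-- A's association-list lookup is List.find? projected to the value
theorem pvAget?_eq_find? (sd : List (String × List String)) (k : String) :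
    pvAget? sd k = (sd.find? (fun kv => kv.1 == k)).map Prod.snd := by
  induction sd with
  | nil => rfl
  | cons kv rest ih =>
      by_cases h : kv.1 == k
      · simp [pvAget?, List.find?, h]
      · simp only [pvAget?, List.find?, h]
        simpa [h] using ih

-- A's variant loop is findSome? of the lookup
theorem pvAvariantLoop_eq_findSome? (vs : List String) (sd : List (String × List String)) :
    pvAvariantLoop vs sd = vs.findSome? (fun v => (sd.find? (fun kv => kv.1 == v)).map Prod.snd) := by
  induction vs with
  | nil => rfl
  | cons v rest ih =>
      simp only [pvAvariantLoop, List.findSome?, pvAget?_eq_find?]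
      cases (sd.find? (fun kv => kv.1 == v)).map Prod.snd <;> simp [ih]

theorem pvInsertBy_append_of_not {α : Type} (before : α → α → Bool) (x : α) (A ys : List α)
    (h : ∀ a ∈ A, before x a = false) :
    PySem.List.insertBy before x (A ++ ys) = A ++ PySem.List.insertBy before x ys := by
  induction A with
  | nil => rfl
  | cons a A ih =>
      have ha : before x a = false := h a (by simp)
      simp only [List.cons_append, PySem.List.insertBy, ha]
      simp only [Bool.false_eq_true, if_false, List.cons.injEq, true_and]
      exact ih (fun b hb => h b (by simp [hb]))

-- the key invariant of Python's stable reverse sort on {1,2}-scored pairs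
theorem pvSortAux (L : List (Int × String)) :
    ∀ (A B : List (Int × String)),
      (∀ p ∈ L, p.1 = 2 ∨ p.1 = 1) → (∀ p ∈ A, p.1 = 2) → (∀ p ∈ B, p.1 = 1) →
      L.foldl (fun acc x => PySem.List.insertBy (fun a b => decide (b.1 < a.1)) x acc) (A ++ B)
        = (A ++ L.filter (fun p => p.1 == 2)) ++ (B ++ L.filter (fun p => p.1 == 1)) := by
  induction L with
  | nil => intro A B _ _ _; simp
  | cons p rest ih =>
      intro A B hL hA hB
      have hrest : ∀ q ∈ rest, q.1 = 2 ∨ q.1 = 1 := fun q hq => hL q (by simp [hq])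
      simp only [List.foldl_cons]
      rcases hL p (by simp) with h2 | h1
      · have hins : PySem.List.insertBy (fun a b => decide (b.1 < a.1)) p (A ++ B)
            = (A ++ [p]) ++ B := by
          have hAn : ∀ a ∈ A, (decide (a.1 < p.1) : Bool) = false := by
            intro a ha; have := hA a ha; simp [this, h2]
          rw [pvInsertBy_append_of_not _ _ _ _ hAn]
          cases B with
          | nil => simp [PySem.List.insertBy]
          | cons b B' =>
              have hb : b.1 = 1 := hB b (by simp)
              simp [PySem.List.insertBy, hb, h2]
        have hA' : ∀ q ∈ A ++ [p], q.1 = 2 := by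
          intro q hq; rcases List.mem_append.1 hq with h | h
          · exact hA q h
          · simp at h; simp [h, h2]
        rw [hins, ih (A ++ [p]) B hrest hA' hB]
        simp [h2]
      · have hins : PySem.List.insertBy (fun a b => decide (b.1 < a.1)) p (A ++ B)
            = A ++ (B ++ [p]) := by
          have hn : ∀ a ∈ A ++ B, (decide (a.1 < p.1) : Bool) = false := by
            intro a ha; rcases List.mem_append.1 ha with h | h
            · have := hA a h; simp [this, h1]
            · have := hB a h; simp [this, h1]
          rw [PySem.List.insertBy_of_forall_not_before _ _ _ hn, List.append_assoc]
        have hB' : ∀ q ∈ B ++ [p], q.1 = 1 := by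
          intro q hq; rcases List.mem_append.1 hq with h | h
          · exact hB q h
          · simp at h; simp [h, h1]
        rw [hins, ih A (B ++ [p]) hrest hA hB']
        have hne : p.1 ≠ 2 := by omega
        simp [h1, List.append_assoc]

-- A's seen/unique loop, with seen = uniq, is Set.update
theorem pvAdedupLoop_eq_update (L : List (Int × String)) :
    ∀ (u : PySem.Set String), pvAdedupLoop L u u = PySem.Set.update u (L.map Prod.snd) := by
  induction L with
  | nil => intro u; rfl
  | cons p rest ih =>
      intro u
      by_cases h : PySem.Set.contains u p.2
      · have hadd : PySem.Set.add u p.2 = u := by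
          simp only [PySem.Set.add, h, if_true]
        simp only [pvAdedupLoop, h, if_true, List.map_cons, PySem.Set.update_cons, hadd]
        exact ih u
      · have hadd : PySem.Set.add u p.2 = u ++ [p.2] := by
          simp only [PySem.Set.add, Bool.not_eq_true] at h ⊢
          rw [h]; simp
        simp only [pvAdedupLoop, h, List.map_cons, PySem.Set.update_cons, hadd]
        exact ih (u ++ [p.2])

-- A's dedup loop started empty is ordered dedup of the suggestions
theorem pvAdedupLoop_eq (L : List (Int × String)) :
    pvAdedupLoop L PySem.Set.empty [] = PySem.List.dedup (L.map Prod.snd) := by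
  have h := pvAdedupLoop_eq_update L ([] : PySem.Set String)
  exact h.trans (by rw [PySem.Set.update_nil_left, PySem.List.dedup_eq_ofList])

-- B's early-terminating dedup loop, with seen = out, is take 3 of Set.update
theorem pvBtake3_eq (L : List String) :
    ∀ (u : PySem.Set String), u.length < 3 →
      pvBtake3 L u u = List.take 3 (PySem.Set.update u L) := by
  induction L with
  | nil =>
      intro u hu
      simp only [pvBtake3, PySem.Set.update]
      simp [List.take_of_length_le (Nat.le_of_lt hu)]
  | cons v rest ih =>
      intro u hu
      by_cases h : PySem.Set.contains u v
      · have hadd : PySem.Set.add u v = u := by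
          simp only [PySem.Set.add, h, if_true]
        simp only [pvBtake3, h, if_true, PySem.Set.update_cons, hadd]
        exact ih u hu
      · have hadd : PySem.Set.add u v = u ++ [v] := by
          simp only [PySem.Set.add, Bool.not_eq_true] at h ⊢
          rw [h]; simp
        simp only [pvBtake3, h, Bool.false_eq_true, if_false, PySem.Set.update_cons, hadd]
        by_cases h3 : (u ++ [v]).length = 3
        · rw [if_pos (by simp only [beq_iff_eq]; exact h3)]
          rw [PySem.Set.update_eq_append_filter]
          rw [List.take_append_of_le_length (by omega)]
          simp [List.take_of_length_le (Nat.le_of_eq h3)]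
        · rw [if_neg (by simp only [beq_iff_eq]; exact h3)]
          have hlen : (u ++ [v]).length < 3 := by
            simp only [List.length_append, List.length_cons, List.length_nil] at h3 ⊢
            omega
          exact ih (u ++ [v]) hlen

-- B's weak-match pass collects the same values as A's elif branch
theorem pvBcandidates_eq (ingredient : String) (sd : List (String × List String)) :
    pvBcandidates ingredient sd
      = sd.flatMap (fun kv => if PySem.Str.isIn kv.1 ingredient then kv.2 else []) ++
        sd.flatMap (fun kv =>
          if ¬ PySem.Str.isIn kv.1 ingredient ∧ PySem.Str.isIn ingredient kv.1 then kv.2 else []) := by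
  unfold pvBcandidates
  congr 1
  refine List.flatMap_congr ?_
  intro kv _
  by_cases c2 : PySem.Chars.isIn kv.1.toList ingredient.toList <;>
    by_cases c1 : PySem.Chars.isIn ingredient.toList kv.1.toList <;>
      simp [PySem.Str.isIn, c2, c1]

-- B's loop started with empty seen/out is dedup-then-take-3
theorem pvBtake3_empty (L : List String) :
    pvBtake3 L PySem.Set.empty [] = List.take 3 (PySem.List.dedup L) := by
  have h := pvBtake3_eq L PySem.Set.empty (by simp [PySem.Set.empty])
  rw [PySem.List.dedup_eq_ofList, ← PySem.Set.update_nil_left]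
  exact h

theorem find_substitutions_py_spec : Claim_equal_find_substitutions_py := by
  unfold Claim_equal_find_substitutions_py Spec_find_substitutions_py
  intro ingredient sd _
  unfold find_substitutions_py find_substitutions_py_alt
  simp only [pvAget?_eq_find?, pvAvariantLoop_eq_findSome?]
  cases hd : (sd.find? (fun kv => kv.1 == ingredient)).map Prod.snd with
  | some vs => simp [List.findSome?, hd]
  | none =>
      simp only [List.findSome?, hd]
      cases h1 : (sd.find? (fun kv => kv.1 == PySem.Str.replace ingredient "-" " ")).map Prod.snd with
      | some vs => rfl
      | none =>
        cases h2 : (sd.find? (fun kv => kv.1 == PySem.Str.replace ingredient " " "-")).map Prod.snd with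
        | some vs => rfl
        | none =>
          -- partial-match phase
          have hscored := PySem.List.foldl_congr_mem (l := sd) (init := ([] : List (Int × String)))
            (f := fun acc kv =>
              if PySem.Str.isIn kv.1 ingredient then
                kv.2.foldl (fun a v => a ++ [((2 : Int), v)]) acc
              else if PySem.Str.isIn ingredient kv.1 then
                kv.2.foldl (fun a v => a ++ [((1 : Int), v)]) acc
              else acc)
            (g := fun acc kv => acc ++
              (if PySem.Str.isIn kv.1 ingredient then kv.2.map (fun v => ((2 : Int), v))
               else if PySem.Str.isIn ingredient kv.1 then kv.2.map (fun v => ((1 : Int), v))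
               else []))
            (by intro acc kv _
                dsimp only
                split_ifs with c2 c1
                · rw [PySem.List.foldl_append_singleton_eq_map (fun v => ((2 : Int), v)) kv.2 acc]
                · rw [PySem.List.foldl_append_singleton_eq_map (fun v => ((1 : Int), v)) kv.2 acc]
                · simp)
          rw [hscored, PySem.List.foldl_append_eq_flatMap, PySem.List.sorted_rev_eq_foldl_insertBy,
              List.nil_append]
          have hmem : ∀ p ∈ sd.flatMap (fun kv =>
              if PySem.Str.isIn kv.1 ingredient then kv.2.map (fun v => ((2 : Int), v))
              else if PySem.Str.isIn ingredient kv.1 then kv.2.map (fun v => ((1 : Int), v))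
              else []), p.1 = 2 ∨ p.1 = 1 := by
            intro p hp
            rcases List.mem_flatMap.1 hp with ⟨kv, _, hpk⟩
            split_ifs at hpk with c2 c1 <;> simp at hpk
            · rcases hpk with ⟨v, _, hv⟩; left; simp [← hv]
            · rcases hpk with ⟨v, _, hv⟩; right; simp [← hv]
          have hsort := pvSortAux _ [] [] hmem (by simp) (by simp)
          simp only [List.nil_append, List.append_nil] at hsort
          rw [hsort, pvAdedupLoop_eq]
          have hfil2 : (sd.flatMap (fun kv =>
              if PySem.Str.isIn kv.1 ingredient then kv.2.map (fun v => ((2 : Int), v))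
              else if PySem.Str.isIn ingredient kv.1 then kv.2.map (fun v => ((1 : Int), v))
              else [])).filter (fun p => p.1 == 2)
              = (sd.flatMap (fun kv => if PySem.Str.isIn kv.1 ingredient then kv.2 else [])).map
                  (fun v => ((2 : Int), v)) := by
            rw [List.filter_flatMap, List.map_flatMap]
            refine List.flatMap_congr ?_
            intro kv _
            by_cases c2 : PySem.Chars.isIn kv.1.toList ingredient.toList <;>
              by_cases c1 : PySem.Chars.isIn ingredient.toList kv.1.toList <;>
                simp [PySem.Str.isIn, c2, c1, List.filter_map, Function.comp_def]
          have hfil1 : (sd.flatMap (fun kv =>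
              if PySem.Str.isIn kv.1 ingredient then kv.2.map (fun v => ((2 : Int), v))
              else if PySem.Str.isIn ingredient kv.1 then kv.2.map (fun v => ((1 : Int), v))
              else [])).filter (fun p => p.1 == 1)
              = (sd.flatMap (fun kv =>
                  if ¬ PySem.Str.isIn kv.1 ingredient ∧ PySem.Str.isIn ingredient kv.1 then kv.2
                  else [])).map (fun v => ((1 : Int), v)) := by
            rw [List.filter_flatMap, List.map_flatMap]
            refine List.flatMap_congr ?_
            intro kv _
            by_cases c2 : PySem.Chars.isIn kv.1.toList ingredient.toList <;>
              by_cases c1 : PySem.Chars.isIn ingredient.toList kv.1.toList <;>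
                simp [PySem.Str.isIn, c2, c1, List.filter_map, Function.comp_def]
          rw [hfil2, hfil1, List.map_append, List.map_map, List.map_map,
              PySem.List.slice_to _ (by norm_num)]
          rw [pvBcandidates_eq, pvBtake3_empty]
          simp [Function.comp_def]
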